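-- pv_equiv track=rewrite | github.com/omadli/eimzo | eimzo/utils.py | decode_str
-- ===== SOURCE A (Python) =====
-- def decode_str(s: str) -> str:
--     res = ""
--     for letter in list(s):
--         o = ord(letter)
--         if 47 < o < 95:
--             i = chr(o + 1024)
--         else:
--             i = letter
--         res += i
--     return res
-- ===== SOURCE B (Python) =====
-- def decode_str(s: str) -> str:
--     n = len(s)
--     if n == 0:
--         return ""
--     if n == 1:
--         o = ord(s)
--         return chr(o + 1024) if 48 <= o <= 94 else s
--     m = n // 2
--     return decode_str(s[:m]) + decode_str(s[m:])
-- ===== Notes on version B (the rewrite author's own statement) =====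
-- stated objective: alternative
-- what changed: Replaced A's linear accumulate-per-character loop by a divide-and-conquer recursion that splits the string at its midpoint, decodes each half recursively and concatenates, with the single-character shift as the base case.
import Mathlib
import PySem

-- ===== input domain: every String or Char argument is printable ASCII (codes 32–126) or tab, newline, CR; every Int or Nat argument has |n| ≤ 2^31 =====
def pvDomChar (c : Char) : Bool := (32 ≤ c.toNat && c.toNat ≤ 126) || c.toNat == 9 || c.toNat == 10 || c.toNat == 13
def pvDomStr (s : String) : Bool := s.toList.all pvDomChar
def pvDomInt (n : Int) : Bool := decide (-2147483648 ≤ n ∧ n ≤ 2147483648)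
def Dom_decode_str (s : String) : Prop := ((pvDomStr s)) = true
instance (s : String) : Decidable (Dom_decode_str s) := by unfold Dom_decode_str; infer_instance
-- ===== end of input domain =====

-- B replaces A's linear accumulate-per-character loop by a midpoint divide-and-conquer recursion (alternative decomposition, same results).

-- ===== PORT A =====
-- res = ""; for letter in list(s): o = ord(letter); i = chr(o+1024) if 47 < o < 95 else letter; res += i
def decode_str (s : String) : String :=
  s.toList.foldl (fun res letter =>
    let o : Int := (letter.toNat : Int)
    let i : Char := if 47 < o ∧ o < 95 then Char.ofNat (o + 1024).toNat else letter
    res.push i) ""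

-- ===== PORT B =====
-- n = len(s); if n == 0: ""; if n == 1: shifted char; else decode(s[:m]) + decode(s[m:]) with m = n//2
def decode_str_alt_go (l : List Char) : List Char :=
  if l.length = 0 then []
  else if _h1 : l.length = 1 then
    match l with
    | [c] =>
        let o : Int := (c.toNat : Int)
        if 48 ≤ o ∧ o ≤ 94 then [Char.ofNat (o + 1024).toNat] else [c]
    | _ => []
  else
    decode_str_alt_go (l.take (l.length / 2)) ++ decode_str_alt_go (l.drop (l.length / 2))
termination_by l.length
decreasing_by
  · simp only [List.length_take]; omega
  · simp only [List.length_drop]; omega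

def decode_str_alt (s : String) : String := String.ofList (decode_str_alt_go s.toList)

-- ===== PRECONDITION & SPEC =====
def Spec_decode_str (s : String) (out : String) : Prop := out = decode_str_alt s
instance (s : String) (out : String) : Decidable (Spec_decode_str s out) := by unfold Spec_decode_str; infer_instance

-- ===== CLAIM (what is proved, stated in full; the proofs are below) =====
def Claim_equal_decode_str : Prop := ∀ (s : String), Dom_decode_str s → Spec_decode_str s (decode_str s)

-- ===== LEMMAS AND PROOFS =====

-- the common per-character map, stated in B's form
def pvDec (c : Char) : Char :=
  if 48 ≤ (c.toNat : Int) ∧ (c.toNat : Int) ≤ 94 then Char.ofNat ((c.toNat : Int) + 1024).toNat else c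

theorem dec_eq_a (c : Char) :
    (if 47 < (c.toNat : Int) ∧ (c.toNat : Int) < 95 then
        Char.ofNat ((c.toNat : Int) + 1024).toNat else c) = pvDec c := by
  unfold pvDec
  have h : (47 < (c.toNat : Int) ∧ (c.toNat : Int) < 95) ↔
      (48 ≤ (c.toNat : Int) ∧ (c.toNat : Int) ≤ 94) := by omega
  rw [if_congr h rfl rfl]

theorem go_eq_map_len : ∀ (n : Nat) (l : List Char), l.length = n →
    decode_str_alt_go l = l.map pvDec := by
  intro n
  induction n using Nat.strong_induction_on with
  | _ n ih =>
    intro l hl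
    rw [decode_str_alt_go]
    split_ifs with h0 h1
    · obtain rfl := List.length_eq_zero_iff.mp h0; rfl
    · obtain ⟨c, rfl⟩ := List.length_eq_one_iff.mp h1
      exact (apply_ite (fun x : Char => [x]) _ _ _).symm
    · rw [ih (l.take (l.length / 2)).length (by simp; omega) _ rfl,
          ih (l.drop (l.length / 2)).length (by simp; omega) _ rfl,
          List.map_take, List.map_drop, List.take_append_drop]

theorem go_eq_map (l : List Char) : decode_str_alt_go l = l.map pvDec :=
  go_eq_map_len l.length l rfl

theorem push_append_ofList (acc : String) (c : Char) (l : List Char) :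
    (acc.push c) ++ String.ofList l = acc ++ String.ofList (c :: l) := by
  have h1 : String.ofList (c :: l) = String.ofList [c] ++ String.ofList l := by
    rw [← String.ofList_append]; rfl
  have h2 : acc.push c = acc ++ String.ofList [c] := rfl
  rw [h1, h2, String.append_assoc]

theorem decode_str_foldl (l : List Char) (acc : String) :
    l.foldl (fun res letter =>
      let o : Int := (letter.toNat : Int)
      let i : Char := if 47 < o ∧ o < 95 then Char.ofNat (o + 1024).toNat else letter
      res.push i) acc
    = acc ++ String.ofList (l.map pvDec) := by
  induction l generalizing acc with
  | nil => simp
  | cons c cs ih =>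
      simp only [List.foldl, List.map]
      rw [ih, dec_eq_a c, push_append_ofList]

-- ===== VERDICT (by name: the statement is the Claim_ definition above) =====
theorem decode_str_spec : Claim_equal_decode_str := by
  intro s _
  unfold Spec_decode_str decode_str decode_str_alt
  rw [decode_str_foldl, go_eq_map]
  simp
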